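-- pv_equiv track=rewrite | github.com/pythonlayer/customzombiemaker | list_builder.py | is_grid_entry
-- ===== SOURCE A (Python) =====
-- GRID_KEYWORDS = [
--     "grave",
--     "gravestone",
--     "railcart",
--     "minecart",
--     "portal",
--     "present",
--     "tar",
--     "powertile",
--     "goldtile",
--     "bufftile",
--     "plank",
--     "tile",
--     "portal",
--     "present",
--     "potion",
--     "lilypad",
--     "vase",
--     "surfboard",
--     "tent",
--     "backpack",
--     "slider",
--     "sap",
--     "lava",
--     "wisp",
--     "trap",
--     "crater",
--     "speaker",
--     "cabinet",
--     "flower",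
--     "seed",
--     "boosttile",
--     "score_",
--     "staff",
--     "oil",
--     "butter",
--     "rock",
--     "egg",
--     "sewer",
--     "scarecrow",
--     "holidaydrink",
--     "traptile",
--     "fireworks",
--     "snow",
--     "cloud",
--     "effect",
--     "rain",
--     "thunderstorm",
--     "puddle",
--     "table",
--     "box",
--     "card",
--     "fog",
--     "shield",
--     "cauldron",
--     "yuanbao",
-- ]
--
-- def is_grid_entry(name, codes):
--     lower = name.lower()
--     if any(keyword in lower for keyword in GRID_KEYWORDS):
--         return True
--     for code in codes:
--         lower_code = code.lower()
--         if any(keyword in lower_code for keyword in GRID_KEYWORDS):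
--             return True
--     return False
-- ===== SOURCE B (Python) =====
-- GRID_KEYWORDS = [
--     "grave",
--     "gravestone",
--     "railcart",
--     "minecart",
--     "portal",
--     "present",
--     "tar",
--     "powertile",
--     "goldtile",
--     "bufftile",
--     "plank",
--     "tile",
--     "portal",
--     "present",
--     "potion",
--     "lilypad",
--     "vase",
--     "surfboard",
--     "tent",
--     "backpack",
--     "slider",
--     "sap",
--     "lava",
--     "wisp",
--     "trap",
--     "crater",
--     "speaker",
--     "cabinet",
--     "flower",
--     "seed",
--     "boosttile",
--     "score_",
--     "staff",
--     "oil",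
--     "butter",
--     "rock",
--     "egg",
--     "sewer",
--     "scarecrow",
--     "holidaydrink",
--     "traptile",
--     "fireworks",
--     "snow",
--     "cloud",
--     "effect",
--     "rain",
--     "thunderstorm",
--     "puddle",
--     "table",
--     "box",
--     "card",
--     "fog",
--     "shield",
--     "cauldron",
--     "yuanbao",
-- ]
--
-- # First-character index: maps a character to the keywords starting with it,
-- # so the text is scanned position by position and only the handful of
-- # keywords whose first letter matches the current character are tested.
-- _BUCKETS = {}
-- for _kw in GRID_KEYWORDS:
--     _BUCKETS[_kw[0]] = _BUCKETS.get(_kw[0], []) + [_kw]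
--
--
-- def _has_keyword(text):
--     # Position-major scan: one pass over the text, per position a bucket
--     # lookup on the current character and prefix tests for that bucket only.
--     for i in range(len(text)):
--         for kw in _BUCKETS.get(text[i], []):
--             if text.startswith(kw, i):
--                 return True
--     return False
--
--
-- def is_grid_entry(name, codes):
--     return _has_keyword(name.lower()) or any(
--         _has_keyword(code.lower()) for code in codes)
-- ===== Notes on version B (the rewrite author's own statement) =====
-- stated objective: alternative
-- what changed: A does a keyword-major scan ('keyword in text' for each of the 55 keywords, per string); B builds a first-character bucket index of the keywords once and scans each lowered string position-major, testing at each position only the keywords whose first letter matches the current character.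
import Mathlib
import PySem

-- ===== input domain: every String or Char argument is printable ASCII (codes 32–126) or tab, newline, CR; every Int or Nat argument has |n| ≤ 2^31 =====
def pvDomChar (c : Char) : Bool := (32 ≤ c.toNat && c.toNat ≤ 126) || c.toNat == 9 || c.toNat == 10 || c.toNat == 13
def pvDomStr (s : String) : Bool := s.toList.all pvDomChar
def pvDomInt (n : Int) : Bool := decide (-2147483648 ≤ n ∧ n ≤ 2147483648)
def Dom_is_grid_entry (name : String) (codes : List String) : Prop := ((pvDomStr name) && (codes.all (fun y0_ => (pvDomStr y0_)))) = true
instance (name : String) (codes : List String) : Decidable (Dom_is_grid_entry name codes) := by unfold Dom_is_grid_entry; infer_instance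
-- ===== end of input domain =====

-- B replaces A's keyword-major scan (each keyword tested with 'in' against every lowered
-- string) by a first-character bucket index built once from the keyword list and a
-- position-major scan testing only the keywords whose first letter matches; same value.

def GRID_KEYWORDS : List String := [
  "grave", "gravestone", "railcart", "minecart", "portal", "present", "tar",
  "powertile", "goldtile", "bufftile", "plank", "tile", "portal", "present",
  "potion", "lilypad", "vase", "surfboard", "tent", "backpack", "slider",
  "sap", "lava", "wisp", "trap", "crater", "speaker", "cabinet", "flower",
  "seed", "boosttile", "score_", "staff", "oil", "butter", "rock", "egg",
  "sewer", "scarecrow", "holidaydrink", "traptile", "fireworks", "snow",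
  "cloud", "effect", "rain", "thunderstorm", "puddle", "table", "box",
  "card", "fog", "shield", "cauldron", "yuanbao"]

-- ===== PORT A =====
-- 'for code in codes: if any(...): return True' as structural recursion
def aCodesLoop (codes : List String) : Bool :=
  match codes with
  | [] => false
  | code :: rest =>
    let lower_code := PySem.Str.lower code
    if GRID_KEYWORDS.any (fun keyword => PySem.Str.isIn keyword lower_code) then true
    else aCodesLoop rest

def is_grid_entry (name : String) (codes : List String) : Bool :=
  let lower := PySem.Str.lower name
  if GRID_KEYWORDS.any (fun keyword => PySem.Str.isIn keyword lower) then true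
  else aCodesLoop codes

-- ===== PORT B =====
-- _kw[0]; exact here since every GRID keyword is nonempty
def bHead (kw : String) : Char := kw.toList.headD ' '

-- the module-level loop building _BUCKETS: _BUCKETS[_kw[0]] = _BUCKETS.get(_kw[0], []) + [_kw]
def BUCKETS : PySem.Dict Char (List String) :=
  GRID_KEYWORDS.foldl (fun d kw => d.modify (bHead kw) [] (· ++ [kw])) PySem.Dict.empty

-- _has_keyword: for i in range(len(text)): for kw in _BUCKETS.get(text[i], []): if text.startswith(kw, i): …
-- (recursion over the suffix at position i; text.startswith(kw, i) = startswith of that suffix)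
def bHasKeyword (text : List Char) : Bool :=
  match text with
  | [] => false
  | c :: rest =>
    if (BUCKETS.getD c []).any (fun kw => PySem.Chars.startswith (c :: rest) kw.toList) then true
    else bHasKeyword rest

def is_grid_entry_alt (name : String) (codes : List String) : Bool :=
  bHasKeyword (PySem.Str.lower name).toList
    || codes.any (fun code => bHasKeyword (PySem.Str.lower code).toList)

-- ===== PRECONDITION & SPEC =====
def Spec_is_grid_entry (name : String) (codes : List String) (out : Bool) : Prop := out = is_grid_entry_alt name codes
instance (name : String) (codes : List String) (out : Bool) : Decidable (Spec_is_grid_entry name codes out) := by unfold Spec_is_grid_entry; infer_instance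

-- ===== CLAIM (what is proved, stated in full; the proofs are below) =====
def Claim_equal_is_grid_entry : Prop := ∀ (name : String) (codes : List String), Dom_is_grid_entry name codes → Spec_is_grid_entry name codes (is_grid_entry name codes)

-- ===== LEMMAS AND PROOFS =====

theorem grid_keywords_ne_nil : ∀ kw ∈ GRID_KEYWORDS, kw.toList ≠ [] := by decide

set_option maxRecDepth 8192 in
-- the bucket at c holds exactly the keywords whose first letter is c
theorem mem_bucket (c : Char) (kw : String) :
    kw ∈ BUCKETS.getD c [] ↔ kw ∈ GRID_KEYWORDS ∧ bHead kw = c := by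
  unfold BUCKETS
  rw [show (GRID_KEYWORDS.foldl (fun d kw => d.modify (bHead kw) [] (· ++ [kw])) PySem.Dict.empty)
        = ((GRID_KEYWORDS.map (fun kw => (bHead kw, kw))).foldl
            (fun d p => d.modify p.1 [] (· ++ [p.2])) PySem.Dict.empty) from
      (List.foldl_map (f := fun kw => (bHead kw, kw))
        (g := fun (d : PySem.Dict Char (List String)) p => d.modify p.1 [] (fun x => x ++ [p.2]))
        (l := GRID_KEYWORDS) (init := PySem.Dict.empty)).symm]
  rw [PySem.Dict.getD_foldl_modify_append]
  simp only [PySem.Dict.getD_empty, List.nil_append, List.mem_map, List.mem_filter]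
  constructor
  · rintro ⟨p, ⟨⟨y, hy, rfl⟩, hc⟩, rfl⟩
    exact ⟨hy, by simpa using hc⟩
  · rintro ⟨h, rfl⟩
    exact ⟨(bHead kw, kw), ⟨⟨kw, h, rfl⟩, by simp⟩, rfl⟩

-- substring occurrence splits off the first position
theorem isIn_cons (sub : List Char) (c : Char) (rest : List Char) :
    PySem.Chars.isIn sub (c :: rest)
      = (PySem.Chars.startswith (c :: rest) sub || PySem.Chars.isIn sub rest) := by
  rw [Bool.eq_iff_iff, Bool.or_eq_true, ← PySem.Chars.exists_prefix_drop_iff_isIn,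
      ← PySem.Chars.exists_prefix_drop_iff_isIn, PySem.Chars.startswith_iff]
  constructor
  · rintro ⟨j, h⟩
    cases j with
    | zero => exact Or.inl h
    | succ j' => exact Or.inr ⟨j', by simpa using h⟩
  · rintro (h | ⟨j, h⟩)
    · exact ⟨0, h⟩
    · exact ⟨j + 1, by simpa using h⟩

-- a nonempty prefix of c :: rest starts with c
theorem head_of_startswith (sub : List Char) (c : Char) (rest : List Char)
    (hne : sub ≠ []) (h : PySem.Chars.startswith (c :: rest) sub = true) :
    sub.headD ' ' = c := by
  rw [PySem.Chars.startswith_iff] at h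
  cases sub with
  | nil => exact absurd rfl hne
  | cons d tl =>
    obtain ⟨t, ht⟩ := h
    have hdc := congrArg (fun l => l.headD ' ') ht
    simpa using hdc

-- at a given position, testing only the bucket of the current character loses nothing
theorem bucket_any (c : Char) (rest : List Char) :
    (BUCKETS.getD c []).any (fun kw => PySem.Chars.startswith (c :: rest) kw.toList)
      = GRID_KEYWORDS.any (fun kw => PySem.Chars.startswith (c :: rest) kw.toList) := by
  rw [Bool.eq_iff_iff, List.any_eq_true, List.any_eq_true]
  constructor
  · rintro ⟨kw, hmem, hsw⟩
    exact ⟨kw, ((mem_bucket c kw).mp hmem).1, hsw⟩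
  · rintro ⟨kw, hmem, hsw⟩
    refine ⟨kw, (mem_bucket c kw).mpr ⟨hmem, ?_⟩, hsw⟩
    have hne : kw.toList ≠ [] := grid_keywords_ne_nil kw hmem
    exact head_of_startswith kw.toList c rest hne hsw

-- B's position-major bucket scan finds a keyword iff some keyword occurs as a substring
theorem bHasKeyword_eq (text : List Char) :
    bHasKeyword text = GRID_KEYWORDS.any (fun kw => PySem.Chars.isIn kw.toList text) := by
  induction text with
  | nil => decide
  | cons c rest ih =>
    rw [bHasKeyword]
    by_cases h : ((BUCKETS.getD c []).any (fun kw => PySem.Chars.startswith (c :: rest) kw.toList)) = true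
    · rw [if_pos h]
      rw [bucket_any, List.any_eq_true] at h
      obtain ⟨kw, hmem, hsw⟩ := h
      symm
      rw [List.any_eq_true]
      exact ⟨kw, hmem, by rw [isIn_cons, hsw, Bool.true_or]⟩
    · rw [if_neg h, ih, Bool.eq_iff_iff, List.any_eq_true, List.any_eq_true]
      rw [bucket_any] at h
      rw [Bool.not_eq_true, List.any_eq_false] at h
      constructor
      · rintro ⟨kw, hmem, hin⟩
        refine ⟨kw, hmem, ?_⟩
        rw [isIn_cons, hin, Bool.or_true]
      · rintro ⟨kw, hmem, hin⟩
        rw [isIn_cons, Bool.or_eq_true] at hin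
        rcases hin with hsw | hin
        · exact absurd hsw (by simpa using h kw hmem)
        · exact ⟨kw, hmem, hin⟩

-- A's code loop is an `any`
theorem aCodesLoop_eq (codes : List String) :
    aCodesLoop codes
      = codes.any (fun c => GRID_KEYWORDS.any (fun k => PySem.Str.isIn k (PySem.Str.lower c))) := by
  induction codes with
  | nil => rfl
  | cons c rest ih =>
    simp only [aCodesLoop, List.any_cons]
    by_cases h : (GRID_KEYWORDS.any fun k => PySem.Str.isIn k (PySem.Str.lower c)) = true
    · rw [if_pos h, h, Bool.true_or]
    · rw [if_neg h, ih]
      rw [Bool.not_eq_true] at h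
      rw [h, Bool.false_or]

-- bHasKeyword on a lowered string is A's per-string check
theorem bHasKeyword_str (s : String) :
    bHasKeyword (PySem.Str.lower s).toList
      = GRID_KEYWORDS.any (fun k => PySem.Str.isIn k (PySem.Str.lower s)) := by
  rw [bHasKeyword_eq]
  refine List.any_congr rfl ?_
  intro kw
  rw [PySem.Str.isIn_eq]

-- ===== VERDICT (by name: the statement is the Claim_ definition above) =====
theorem is_grid_entry_spec : Claim_equal_is_grid_entry := by
  intro name codes _
  unfold Spec_is_grid_entry is_grid_entry is_grid_entry_alt
  dsimp only
  rw [aCodesLoop_eq, bHasKeyword_str]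
  by_cases h : (GRID_KEYWORDS.any fun keyword => PySem.Str.isIn keyword (PySem.Str.lower name)) = true
  · rw [if_pos h, h, Bool.true_or]
  · rw [if_neg h, Bool.not_eq_true] at *
    rw [h, Bool.false_or]
    refine List.any_congr rfl ?_
    intro code
    rw [bHasKeyword_str]
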